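-- pv_equiv track=rewrite | github.com/ryotaro612/lc | src/serial/minimum_number_of_keypresses.py | minimumKeypresses
-- ===== SOURCE A (Python) =====
-- from collections import Counter
--
-- def minimumKeypresses(s: str) -> int:
--     counter = Counter(s)
--
--     order = sorted([c for c in counter], key=lambda c: counter[c], reverse=True)
--     c_to_i = {c: i for i, c in enumerate(order)}
--     result = 0
--     for c, freq in counter.items():
--         if c_to_i[c] < 9:
--             result += freq
--         elif c_to_i[c] < 18:
--             result += freq * 2
--         else:
--             result += freq * 3
--     return result
-- ===== SOURCE B (Python) =====
-- from collections import Counter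
--
-- def minimumKeypresses(s: str) -> int:
--     # Pay 3 presses for every character, then refund the savings earned by the
--     # largest 18 frequencies (top 9 save 2 presses each, next 9 save 1 each),
--     # selected by repeated max instead of sorting.
--     vals = list(Counter(s).values())
--     total = 3 * sum(vals)
--     refund = 0
--     for rank in range(min(18, len(vals))):
--         m = max(vals)
--         vals.remove(m)
--         refund += 2 * m if rank < 9 else m
--     return total - refund
-- ===== Notes on version B (the rewrite author's own statement) =====
-- stated objective: alternative
-- what changed: Replaces A's sort + char-to-rank map + keyed second pass by a refund scheme: charge 3 presses per character, then select the 18 largest frequencies by repeated max/remove and refund 2 per occurrence for the top 9 and 1 for the next 9; no sorting and no index map at all.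
import Mathlib
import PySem

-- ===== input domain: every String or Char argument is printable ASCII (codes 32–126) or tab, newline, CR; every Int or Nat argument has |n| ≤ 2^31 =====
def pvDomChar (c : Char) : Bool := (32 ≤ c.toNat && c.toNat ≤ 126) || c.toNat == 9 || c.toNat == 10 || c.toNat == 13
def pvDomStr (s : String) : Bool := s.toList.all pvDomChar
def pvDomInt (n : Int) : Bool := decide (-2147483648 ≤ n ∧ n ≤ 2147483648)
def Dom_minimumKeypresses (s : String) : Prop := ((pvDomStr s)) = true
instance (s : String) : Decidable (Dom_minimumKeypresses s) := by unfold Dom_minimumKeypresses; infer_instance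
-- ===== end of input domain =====

-- B replaces A's sort + char→index map + keyed pass by "pay 3 per character, then refund the
-- savings of the 18 largest frequencies found by repeated max" (objective: alternative).

-- ===== PORT A =====
-- c_to_i[c] in A always finds c (every counter key is in the enumeration of `order`,
-- a permutation of the keys), so the KeyError-free lookup is ported as getD.
def minimumKeypresses (s : String) : Int :=
  let counter := PySem.Dict.counter s.toList
  let order := PySem.List.sorted counter.keys (fun c => counter.getD c 0) true
  let cToI := PySem.Dict.ofList ((PySem.List.enumerate order).map (fun p => (p.2, p.1)))
  counter.items.foldl (fun result p =>
    if cToI.getD p.1 0 < 9 then result + p.2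
    else if cToI.getD p.1 0 < 18 then result + p.2 * 2
    else result + p.2 * 3) 0

-- ===== PORT B =====
-- loop body of B's selection loop: m = max(vals); vals.remove(m); refund += 2*m if rank < 9 else m
-- (max/remove never fail inside the loop, so the `none` arms are unreachable totalization guards)
def pvSelStep (st : List Int × Int) (rank : Int) : List Int × Int :=
  match PySem.List.max? st.1 (fun v => v) with
  | none => st
  | some m =>
    match PySem.List.remove? st.1 m with
    | none => st
    | some rest => (rest, st.2 + (if rank < 9 then 2 * m else m))

def minimumKeypresses_alt (s : String) : Int :=
  let vals := (PySem.Dict.counter s.toList).values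
  let total := 3 * vals.sum
  let fin := (PySem.List.pyRange 0 (min 18 (vals.length : Int)) 1).foldl pvSelStep (vals, 0)
  total - fin.2

-- ===== PRECONDITION & SPEC =====
def Spec_minimumKeypresses (s : String) (out : Int) : Prop := out = minimumKeypresses_alt s
instance (s : String) (out : Int) : Decidable (Spec_minimumKeypresses s out) := by unfold Spec_minimumKeypresses; infer_instance

-- ===== CLAIM (what is proved, stated in full; the proofs are below) =====
def Claim_equal_minimumKeypresses : Prop := ∀ (s : String), Dom_minimumKeypresses s → Spec_minimumKeypresses s (minimumKeypresses s)

-- ===== LEMMAS AND PROOFS =====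

-- a dict built from an association list with distinct keys holds exactly that list
lemma ofList_items_of_nodup (pairs : List (Char × Int)) (h : (pairs.map (·.1)).Nodup) :
    (PySem.Dict.ofList pairs).items = pairs := by
  simp only [PySem.Dict.ofList, PySem.Dict.update]
  have := PySem.Dict.items_foldl_insert_fresh (l := pairs) (k := (·.1)) (v := (·.2))
    (d := PySem.Dict.empty) (by intro a _; simp [PySem.Dict.contains_empty]) h
  simpa using this

-- A's three-way bucket at rank k equals f * min(k//9 + 1, 3)
lemma weight_eq (k : Nat) (f : Int) :
    (if (k : Int) < 9 then f else if (k : Int) < 18 then f * 2 else f * 3)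
      = f * min (PySem.Int.floordiv (k : Int) 9 + 1) 3 := by
  rw [PySem.Int.floordiv_eq_ediv_of_pos (by norm_num)]
  have hm : min ((k : Int) / 9 + 1) 3 = (if (k : Int) < 9 then 1 else if (k : Int) < 18 then 2 else 3) := by
    rw [Int.min_def]; split_ifs <;> omega
  rw [hm]; split_ifs <;> ring

-- A equals the rank-weighted fold over the descending sorted frequency list
lemma A_eq_gold (s : String) : minimumKeypresses s =
    (PySem.List.enumerate
        (PySem.List.sorted (PySem.Dict.counter s.toList).values (fun v => v) true)).foldl
      (fun acc p => acc + p.2 * min (PySem.Int.floordiv p.1 9 + 1) 3) 0 := by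
  simp only [minimumKeypresses]
  set cnt := PySem.Dict.counter s.toList with hcnt
  set freq : Char → Int := fun c => cnt.getD c 0 with hfreq
  set order := PySem.List.sorted cnt.keys freq true with horder
  set pairs := (PySem.List.enumerate order).map (fun p => (p.2, p.1)) with hpairs
  have hknd : cnt.keys.Nodup := PySem.Dict.nodup_keys_counter _
  have hperm : order.Perm cnt.keys := PySem.List.sorted_perm _ _ _
  have hond : order.Nodup := (hperm.nodup_iff).mpr hknd
  have hpk : pairs.map (·.1) = order := by
    simp only [hpairs, List.map_map, Function.comp_def]
    exact PySem.List.map_snd_enumerate _ _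
  have hitems : (PySem.Dict.ofList pairs).items = pairs := ofList_items_of_nodup pairs (hpk ▸ hond)
  have hdnd : (PySem.Dict.ofList pairs).keys.Nodup := by
    simp only [PySem.Dict.keys, hitems]; exact hpk ▸ hond
  have hlook : ∀ (k : Nat), (hk : k < order.length) →
      (PySem.Dict.ofList pairs).getD order[k] 0 = (k : Int) := by
    intro k hk
    apply PySem.Dict.getD_of_mem_items _ _ hdnd
    rw [hitems, hpairs]
    have hmem : ((0 : Int) + k, order[k]) ∈ PySem.List.enumerate order 0 :=
      (PySem.List.mem_enumerate_iff _ _ _).mpr ⟨k, hk, rfl⟩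
    have h2 := List.mem_map_of_mem (f := fun p : Int × Char => (p.2, p.1)) hmem
    simp only [zero_add] at h2
    exact h2
  -- A's loop as a sum over the keys
  have hstep : (fun (result : Int) (p : Char × Int) =>
      if (PySem.Dict.ofList pairs).getD p.1 0 < 9 then result + p.2
      else if (PySem.Dict.ofList pairs).getD p.1 0 < 18 then result + p.2 * 2
      else result + p.2 * 3)
      = (fun result p => result +
          (if (PySem.Dict.ofList pairs).getD p.1 0 < 9 then p.2
           else if (PySem.Dict.ofList pairs).getD p.1 0 < 18 then p.2 * 2
           else p.2 * 3)) := by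
    funext r p; split_ifs <;> rfl
  rw [hstep, PySem.List.foldl_add, PySem.List.foldl_add]
  set g : Char × Int → Int := fun p =>
    if (PySem.Dict.ofList pairs).getD p.1 0 < 9 then p.2
    else if (PySem.Dict.ofList pairs).getD p.1 0 < 18 then p.2 * 2
    else p.2 * 3 with hg
  have hitemsk : cnt.items = cnt.keys.map (fun k => (k, freq k)) :=
    PySem.Dict.items_eq_map_keys cnt hknd 0
  -- the sorted value list is the frequency image of `order`
  have hvals : cnt.values = cnt.keys.map freq := PySem.Dict.values_eq_map_keys cnt hknd 0
  have hsorted : PySem.List.sorted cnt.values (fun v => v) true = order.map freq := by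
    apply List.Perm.eq_of_pairwise (le := fun a b : Int => b ≤ a)
      (fun a b _ _ h1 h2 => le_antisymm h2 h1)
    · exact PySem.List.sorted_pairwise_rev _ _
    · exact List.pairwise_map.mpr (PySem.List.sorted_pairwise_rev _ _)
    · exact (PySem.List.sorted_perm _ _ _).trans
        (by rw [hvals]; exact (hperm.map freq).symm)
  rw [hsorted, hitemsk, List.map_map]
  -- reorder A's sum along `order`, then compare element by element
  have hsum : ((cnt.keys.map (g ∘ fun k => (k, freq k))).sum : Int)
      = ((order.map (g ∘ fun k => (k, freq k))).sum : Int) :=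
    (List.Perm.sum_eq (hperm.map _)).symm
  rw [hsum]
  have hml : List.map (g ∘ fun k => (k, freq k)) order
      = List.map (fun p => p.2 * min (PySem.Int.floordiv p.1 9 + 1) 3)
          (PySem.List.enumerate (List.map freq order)) := by
    apply List.ext_getElem
    · simp [PySem.List.length_enumerate]
    · intro k h1 h2
      have hk : k < order.length := by simpa using h1
      simp only [List.getElem_map, PySem.List.getElem_enumerate, Function.comp_apply]
      simp only [hg, hlook k hk, zero_add]
      exact weight_eq k (freq order[k])
  rw [hml]

-- the refund A's three-way bucket leaves implicit: weight 2 below rank 9, 1 below 18, 0 after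
def pvU (k : Nat) (D : List Int) : Int :=
  match D with
  | [] => 0
  | x :: D' => (if k < 9 then 2 else if k < 18 then 1 else 0) * x + pvU (k+1) D'

-- the refund B's selection loop collects over the first t elements of the descending list
def pvV (k t : Nat) (E : List Int) : Int :=
  match t, E with
  | 0, _ => 0
  | _+1, [] => 0
  | t+1, x :: E' => (if k < 9 then 2 * x else x) + pvV (k+1) t E'

-- rank-weighted sum = 3·sum − refund
lemma gold_map_sum (D : List Int) : ∀ (k : Nat),
    ((PySem.List.enumerate D (k : Int)).map
        (fun p : Int × Int => p.2 * min (PySem.Int.floordiv p.1 9 + 1) 3)).sum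
      = 3 * D.sum - pvU k D := by
  induction D with
  | nil => intro k; simp [pvU]
  | cons x D ih =>
    intro k
    have hx : x * min (PySem.Int.floordiv (k : Int) 9 + 1) 3
        = 3 * x - (if k < 9 then 2 else if k < 18 then 1 else 0) * x := by
      rw [PySem.Int.floordiv_eq_ediv_of_pos (by norm_num)]
      have hm : min ((k : Int) / 9 + 1) 3 = (if k < 9 then 1 else if k < 18 then 2 else 3) := by
        rw [Int.min_def]; split_ifs <;> omega
      rw [hm]; split_ifs <;> ring
    have hcast : (k : Int) + 1 = ((k + 1 : Nat) : Int) := by push_cast; ring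
    rw [PySem.List.enumerate_cons, List.map_cons, List.sum_cons, hcast, ih (k+1)]
    simp only [pvU, List.sum_cons, hx]; ring

-- Python's max of a list permuting a nonempty descending list is its head
lemma max?_of_perm_desc (v : List Int) (x : Int) (E : List Int)
    (hp : v.Perm (x :: E)) (hd : (x :: E).Pairwise (fun a b : Int => b ≤ a)) :
    PySem.List.max? v (fun y => y) = some x := by
  obtain ⟨m, hm⟩ : ∃ m, PySem.List.max? v (fun y => y) = some m := by
    rcases hh : PySem.List.max? v (fun y => y) with _ | m
    · rw [PySem.List.max?_eq_none_iff] at hh; subst hh; exact absurd hp.symm (by simp)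
    · exact ⟨m, rfl⟩
  have h1 : m ≤ x := by
    rcases List.mem_cons.mp (hp.mem_iff.mp (PySem.List.max?_mem hm)) with h | h
    · omega
    · exact (List.pairwise_cons.mp hd).1 m h
  have h2 : x ≤ m := PySem.List.max?_isMax hm x (hp.mem_iff.mpr (by simp))
  rw [hm]; congr 1; omega
lemma perm_erase_of_perm_cons (l : List Int) (a : Int) (l₂ : List Int)
    (h : l.Perm (a :: l₂)) : (l.erase a).Perm l₂ :=
  List.Perm.cons_inv ((List.perm_cons_erase (h.mem_iff.mpr (by simp))).symm.trans h)

-- B's selection loop computes exactly the refund pvV over the descending list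
lemma sel_loop : ∀ (t k : Nat) (E v : List Int) (r : Int),
    E.Pairwise (fun a b : Int => b ≤ a) → v.Perm E → t ≤ E.length →
    ∃ v', (PySem.List.pyRange (k : Int) ((k : Int) + (t : Int)) 1).foldl pvSelStep (v, r)
            = (v', r + pvV k t E) ∧ v'.Perm (E.drop t) := by
  intro t
  induction t with
  | zero =>
    intro k E v r _ hp _
    refine ⟨v, ?_, by simpa using hp⟩
    simp [PySem.List.pyRange, pvV]
  | succ t ih =>
    intro k E v r hd hp hl
    rcases E with _ | ⟨x, E'⟩
    · simp at hl
    have hcons : PySem.List.pyRange (k : Int) ((k : Int) + ((t : Nat) + 1 : Nat)) 1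
        = (k : Int) :: PySem.List.pyRange ((k : Int) + 1) ((k : Int) + ((t : Nat) + 1 : Nat)) 1 := by
      rw [PySem.List.pyRange_one_cons (by push_cast; omega)]
    have hxv : x ∈ v := hp.mem_iff.mpr (by simp)
    have hstep : pvSelStep (v, r) (k : Int)
        = (v.erase x, r + (if (k : Int) < 9 then 2 * x else x)) := by
      simp only [pvSelStep, max?_of_perm_desc v x E' hp hd,
        PySem.List.remove?_eq_some_erase v x hxv]
    have hcast : (k : Int) + ((t : Nat) + 1 : Nat) = ((k + 1 : Nat) : Int) + ((t : Nat) : Int) := by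
      push_cast; ring
    obtain ⟨v', heq, hperm⟩ := ih (k + 1) E' (v.erase x) (r + (if (k : Int) < 9 then 2 * x else x))
      hd.of_cons (perm_erase_of_perm_cons v x E' hp) (by simpa using hl)
    refine ⟨v', ?_, by simpa using hperm⟩
    rw [show ((t : Nat) + 1 : Nat) = ((t + 1 : Nat) : Int) by push_cast; ring] at *
    rw [show ((k + 1 : Nat) : Int) = (k : Int) + 1 by push_cast; ring] at heq
    rw [hcons, List.foldl_cons, hstep, hcast,
      show ((k + 1 : Nat) : Int) = (k : Int) + 1 by push_cast; ring, heq]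
    have hif : (if (k : Int) < 9 then 2 * x else x) = (if k < 9 then 2 * x else x) := by
      split_ifs with h1 h2 <;> first | rfl | omega
    simp only [pvV, hif]; ring_nf
lemma pvU_eq_zero_of_ge (D : List Int) : ∀ (k : Nat), 18 ≤ k → pvU k D = 0 := by
  induction D with
  | nil => intro k _; simp [pvU]
  | cons x D ih =>
    intro k hk
    simp only [pvU, ih (k+1) (by omega)]
    split_ifs <;> omega
lemma pvU_eq_pvV (D : List Int) : ∀ (k : Nat), k ≤ 18 →
    pvU k D = pvV k (min (18 - k) D.length) D := by
  induction D with
  | nil => intro k _; simp [pvU, pvV]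
  | cons x D ih =>
    intro k hk
    by_cases h : k < 18
    · have hm : min (18 - k) (D.length + 1) = min (18 - k - 1) D.length + 1 := by omega
      have h18 : 18 - (k + 1) = 18 - k - 1 := by omega
      rw [List.length_cons, hm]
      simp only [pvU, pvV, ih (k+1) (by omega), h18]
      congr 1
      split_ifs <;> omega
    · have hk18 : k = 18 := by omega
      rw [pvU_eq_zero_of_ge (x :: D) k (by omega), hk18]
      simp [pvV]

-- B equals 3·sum − refund over the descending sorted frequency list
lemma B_eq (s : String) : minimumKeypresses_alt s =
    3 * (PySem.List.sorted (PySem.Dict.counter s.toList).values (fun v => v) true).sum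
      - pvV 0 (min 18 (PySem.List.sorted (PySem.Dict.counter s.toList).values (fun v => v) true).length)
          (PySem.List.sorted (PySem.Dict.counter s.toList).values (fun v => v) true) := by
  simp only [minimumKeypresses_alt]
  set vals := (PySem.Dict.counter s.toList).values with hvals
  set D := PySem.List.sorted vals (fun v => v) true with hD
  have hperm : vals.Perm D := (PySem.List.sorted_perm _ _ _).symm
  have hlen : vals.length = D.length := hperm.length_eq
  have hsum : vals.sum = D.sum := hperm.sum_eq
  have hd : D.Pairwise (fun a b : Int => b ≤ a) := by
    simpa using PySem.List.sorted_pairwise_rev (xs := vals) (key := fun v => v)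
  obtain ⟨v', heq, _⟩ := sel_loop (min 18 D.length) 0 D vals 0 hd hperm (Nat.min_le_right _ _)
  have hb : min (18 : Int) ((vals.length : Nat) : Int)
      = ((0 : Nat) : Int) + ((min 18 D.length : Nat) : Int) := by
    rw [hlen]; push_cast; omega
  simp only [Nat.cast_zero] at heq hb
  rw [hb, heq]
  simp [hsum]

-- ===== VERDICT (by name: the statement is the Claim_ definition above) =====
theorem minimumKeypresses_spec : Claim_equal_minimumKeypresses := by
  intro s _
  unfold Spec_minimumKeypresses
  rw [A_eq_gold, B_eq]
  set D := PySem.List.sorted (PySem.Dict.counter s.toList).values (fun v => v) true with hD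
  have h1 := gold_map_sum D 0
  have h2 := pvU_eq_pvV D 0 (by omega)
  simp only [Nat.sub_zero] at h2
  rw [PySem.List.foldl_add]
  simpa [h2] using h1
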